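-- pv_equiv track=rewrite | github.com/ministar99/monglepick-recommend | app/v2/service/favorite_genre_service.py | _normalize_genre_ids
-- ===== SOURCE A (Python) =====
-- def _normalize_genre_ids(genre_ids: list[int]) -> list[int]:
--     """빈 값 제거와 중복 검사를 수행합니다."""
--     normalized_ids: list[int] = []
--     seen: set[int] = set()
--
--     for raw_genre_id in genre_ids:
--         genre_id = int(raw_genre_id)
--         if genre_id in seen:
--             raise ValueError("같은 장르를 중복해서 저장할 수 없습니다.")
--         seen.add(genre_id)
--         normalized_ids.append(genre_id)
--
--     return normalized_ids
-- ===== SOURCE B (Python) =====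
-- def _normalize_genre_ids(genre_ids: list[int]) -> list[int]:
--     """빈 값 제거와 중복 검사를 수행합니다."""
--     normalized = [int(x) for x in genre_ids]
--     s = sorted(normalized)
--     for a, b in zip(s, s[1:]):
--         if a == b:
--             raise ValueError("같은 장르를 중복해서 저장할 수 없습니다.")
--     return normalized
-- ===== Notes on version B (the rewrite author's own statement) =====
-- stated objective: alternative
-- what changed: Replaces A's hash-set membership scan with a sort-then-adjacent-pair scan: duplicates are detected by sorting a copy and comparing neighbouring elements, no set at all.
-- outside the precondition, e.g. on _normalize_genre_ids([1, 1]): A raises ValueError, B raises ValueError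
import Mathlib
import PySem

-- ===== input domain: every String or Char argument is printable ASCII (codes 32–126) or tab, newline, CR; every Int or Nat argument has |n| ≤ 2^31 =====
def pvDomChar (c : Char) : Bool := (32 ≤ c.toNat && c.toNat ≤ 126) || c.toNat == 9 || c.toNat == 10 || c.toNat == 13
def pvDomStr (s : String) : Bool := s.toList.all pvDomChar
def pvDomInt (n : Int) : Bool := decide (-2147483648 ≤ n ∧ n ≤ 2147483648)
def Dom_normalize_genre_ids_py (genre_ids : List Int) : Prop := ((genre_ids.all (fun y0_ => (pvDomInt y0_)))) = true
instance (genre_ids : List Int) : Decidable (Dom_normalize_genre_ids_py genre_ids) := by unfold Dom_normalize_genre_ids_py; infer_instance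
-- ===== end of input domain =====

-- B detects duplicates by sorting a copy and scanning adjacent pairs, instead of A's
-- incremental seen-set with a mid-loop raise (alternative algorithm; no set at all).

-- ===== PORT A =====
-- loop over genre_ids carrying (seen, normalized_ids); on a duplicate A raises
-- ValueError (excluded by Pre_); the raise branch returns the list built so far (unreachable under Pre_)
def normalizeGoA : List Int → PySem.Set Int → List Int → List Int
  | [], _, acc => acc
  | raw :: rest, seen, acc =>
    let gid := raw  -- int(raw_genre_id) is the identity on int
    if PySem.Set.contains seen gid then acc  -- raise ValueError
    else normalizeGoA rest (PySem.Set.add seen gid) (acc ++ [gid])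

def normalize_genre_ids_py (genre_ids : List Int) : List Int :=
  normalizeGoA genre_ids PySem.Set.empty []

-- ===== PORT B =====
-- for a, b in zip(s, s[1:]): if a == b: raise (raise modelled as 'true' found by the scan)
def checkPairsB : List (Int × Int) → Bool
  | [] => false
  | (a, b) :: t => if a = b then true else checkPairsB t

-- normalized = [int(x) for x in genre_ids]; s = sorted(normalized); adjacent-pair scan; raise excluded by Pre_
def normalize_genre_ids_py_alt (genre_ids : List Int) : List Int :=
  let normalized := genre_ids.map (fun x => x)
  let s := PySem.List.sorted normalized (fun x => x) false
  if checkPairsB (s.zip (s.drop 1)) then []  -- raise ValueError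
  else normalized

-- ===== PRECONDITION & SPEC =====
-- Pre_ excludes lists containing a duplicate value, on which both A and B raise ValueError.
def Pre_normalize_genre_ids_py (genre_ids : List Int) : Prop := genre_ids.Nodup
instance (genre_ids : List Int) : Decidable (Pre_normalize_genre_ids_py genre_ids) := by unfold Pre_normalize_genre_ids_py; infer_instance
def pvWitness_normalize_genre_ids_py : List Int := [3, 1, 2]

def Spec_normalize_genre_ids_py (genre_ids : List Int) (out : List Int) : Prop := out = normalize_genre_ids_py_alt genre_ids
instance (genre_ids : List Int) (out : List Int) : Decidable (Spec_normalize_genre_ids_py genre_ids out) := by unfold Spec_normalize_genre_ids_py; infer_instance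

-- ===== CLAIM (what is proved, stated in full; the proofs are below) =====
def Claim_equal_normalize_genre_ids_py : Prop := ∀ (genre_ids : List Int), Dom_normalize_genre_ids_py genre_ids → Pre_normalize_genre_ids_py genre_ids → Spec_normalize_genre_ids_py genre_ids (normalize_genre_ids_py genre_ids)

-- ===== LEMMAS AND PROOFS =====

-- A's loop on a duplicate-free list whose elements are not yet seen appends the whole list.
theorem normalizeGoA_nodup (xs : List Int) : ∀ (seen acc : List Int),
    xs.Nodup → (∀ x ∈ xs, PySem.Set.contains seen x = false) →
    normalizeGoA xs seen acc = acc ++ xs := by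
  induction xs with
  | nil => intro seen acc _ _; simp [normalizeGoA]
  | cons x xs ih =>
    intro seen acc hnd hfresh
    have hx : PySem.Set.contains seen x = false := hfresh x (by simp)
    simp only [normalizeGoA, hx, if_neg Bool.false_ne_true]
    have hadd : PySem.Set.add seen x = seen ++ [x] := by
      simp [PySem.Set.add, PySem.Set.contains] at hx ⊢
      intro h; exact absurd h hx
    rw [hadd, ih (seen ++ [x]) (acc ++ [x]) hnd.of_cons]
    · simp
    · intro y hy
      have hne : y ≠ x := fun h => (List.nodup_cons.mp hnd).1 (h ▸ hy)
      have hys := hfresh y (by simp [hy])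
      simp [PySem.Set.contains] at hys ⊢
      exact ⟨hys, hne⟩

-- a strictly increasing list has no equal adjacent pair
theorem checkPairsB_of_pairwise_lt (s : List Int) (h : s.Pairwise (· < ·)) :
    checkPairsB (s.zip (s.drop 1)) = false := by
  induction s with
  | nil => simp [checkPairsB]
  | cons a t ih =>
    cases t with
    | nil => simp [checkPairsB]
    | cons b u =>
      have hab : a < b := (List.pairwise_cons.mp h).1 b (by simp)
      simp only [List.drop_one, List.tail_cons, List.zip_cons_cons, checkPairsB]
      rw [if_neg (by omega)]
      simpa using ih (List.pairwise_cons.mp h).2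

-- ===== VERDICT (by name: the statement is the Claim_ definition above) =====
theorem normalize_genre_ids_py_spec : Claim_equal_normalize_genre_ids_py := by
  intro genre_ids _ hpre
  unfold Spec_normalize_genre_ids_py normalize_genre_ids_py normalize_genre_ids_py_alt
  have hA : normalizeGoA genre_ids PySem.Set.empty [] = [] ++ genre_ids :=
    normalizeGoA_nodup genre_ids PySem.Set.empty [] hpre
      (by intro x _; simp [PySem.Set.contains, PySem.Set.empty])
  rw [List.map_id']
  let s := PySem.List.sorted genre_ids (fun x => x) false
  have hperm : s.Perm genre_ids := PySem.List.sorted_perm ..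
  have hnds : s.Nodup := hperm.nodup_iff.mpr hpre
  have hle : s.Pairwise (fun a b => a ≤ b) := by
    simpa using PySem.List.sorted_pairwise (xs := genre_ids) (key := fun x => x)
  have hlt : s.Pairwise (· < ·) :=
    (hle.and hnds).imp (fun ⟨h1, h2⟩ => lt_of_le_of_ne h1 h2)
  have hc : checkPairsB (s.zip (s.drop 1)) = false := checkPairsB_of_pairwise_lt s hlt
  show normalizeGoA genre_ids PySem.Set.empty [] =
    if checkPairsB ((PySem.List.sorted genre_ids (fun x => x) false).zip
        (List.drop 1 (PySem.List.sorted genre_ids (fun x => x) false))) = true then []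
    else genre_ids
  simp only [s] at hc
  rw [hc]
  simpa [PySem.Set.empty] using hA
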